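-- pv_equiv track=rewrite | github.com/DPFNeiland/Python-Environment | 2semestre/prova2/pergunta1.py | verificarPalindromo
-- ===== SOURCE A (Python) =====
-- def Reverter(risadaSemConsoante: str) -> str:
--
--     risadaSemConsoanteInvertida = ""
--
--     for i in range(len(risadaSemConsoante) -1, -1, -1):
--         risadaSemConsoanteInvertida += risadaSemConsoante[i]
--
--     return risadaSemConsoanteInvertida
--
-- def verificarPalindromo(risada: str) -> bool:
--     semConsoante = ""
--
--     for letra in risada:
--         if letra.lower() == "a" or letra.lower() == "e" or letra.lower() == "i" or letra.lower() == "o" or letra.lower() == "u":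
--             semConsoante+=letra
--
--
--     if semConsoante == Reverter(semConsoante):
--         return True
--     return False
-- ===== SOURCE B (Python) =====
-- def verificarPalindromo(risada: str) -> bool:
--     vogais = [letra for letra in risada if letra.lower() in "aeiou"]
--     lo, hi = 0, len(vogais) - 1
--     while lo < hi:
--         if vogais[lo] != vogais[hi]:
--             return False
--         lo += 1
--         hi -= 1
--     return True
-- ===== Notes on version B (the rewrite author's own statement) =====
-- stated objective: alternative
-- what changed: B collects the vowels once and runs an in-place two-pointer palindrome scan over two indices, instead of A's building a reversed copy character by character (via an index loop in a helper) and comparing whole strings.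
import Mathlib
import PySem

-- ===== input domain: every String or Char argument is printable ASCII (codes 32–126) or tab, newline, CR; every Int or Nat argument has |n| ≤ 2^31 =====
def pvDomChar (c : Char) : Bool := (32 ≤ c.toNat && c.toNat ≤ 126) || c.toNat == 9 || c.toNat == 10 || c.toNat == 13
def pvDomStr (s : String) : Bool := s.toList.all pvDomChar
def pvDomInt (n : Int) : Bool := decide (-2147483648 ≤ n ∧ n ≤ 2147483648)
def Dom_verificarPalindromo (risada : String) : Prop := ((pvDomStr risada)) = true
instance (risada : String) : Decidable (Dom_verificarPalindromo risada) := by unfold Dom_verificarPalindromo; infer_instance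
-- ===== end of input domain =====

-- B collects the vowels once and runs a two-pointer scan over two indices instead of
-- A's building a reversed copy character by character and comparing whole strings.

-- ===== PORT A =====
-- helper Reverter: index loop range(len-1, -1, -1), appending s[i] (always in range)
def reverter (s : List Char) : List Char :=
  (PySem.List.pyRange ((s.length : Int) - 1) (-1) (-1)).foldl
    (fun acc i => acc ++ [PySem.List.pyGetD s i ' ']) []

def verificarPalindromo (risada : String) : Bool :=
  let semConsoante := risada.toList.foldl
    (fun acc letra =>
      if PySem.Chars.lowerChar letra = 'a' ∨ PySem.Chars.lowerChar letra = 'e' ∨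
         PySem.Chars.lowerChar letra = 'i' ∨ PySem.Chars.lowerChar letra = 'o' ∨
         PySem.Chars.lowerChar letra = 'u'
      then acc ++ [letra] else acc) []
  if semConsoante = reverter semConsoante then true else false

-- ===== PORT B =====
-- the while-loop with the two indices lo, hi (Int, as in Python: hi starts at len-1)
def twoPtr (v : List Char) (lo hi : Int) : Bool :=
  if _h : lo < hi then
    if PySem.List.pyGetD v lo ' ' ≠ PySem.List.pyGetD v hi ' ' then false
    else twoPtr v (lo + 1) (hi - 1)
  else true
termination_by (hi - lo).toNat
decreasing_by omega

def verificarPalindromo_alt (risada : String) : Bool :=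
  let vogais := risada.toList.filter (fun letra => PySem.Chars.lowerChar letra ∈ ['a','e','i','o','u'])
  twoPtr vogais 0 ((vogais.length : Int) - 1)

-- ===== PRECONDITION & SPEC =====
def Spec_verificarPalindromo (risada : String) (out : Bool) : Prop := out = verificarPalindromo_alt risada
instance (risada : String) (out : Bool) : Decidable (Spec_verificarPalindromo risada out) := by unfold Spec_verificarPalindromo; infer_instance

-- ===== CLAIM (what is proved, stated in full; the proofs are below) =====
def Claim_equal_verificarPalindromo : Prop := ∀ (risada : String), Dom_verificarPalindromo risada → Spec_verificarPalindromo risada (verificarPalindromo risada)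

-- ===== LEMMAS AND PROOFS =====

-- A's helper loop builds the reverse of its argument
theorem reverter_eq_reverse (s : List Char) : reverter s = s.reverse := by
  unfold reverter
  rw [PySem.List.foldl_append_singleton_eq_map, PySem.List.pyRange_neg_one]
  simp only [List.map_map, List.nil_append]
  apply List.ext_getElem
  · simp
  · intro i h1 h2
    simp only [List.getElem_map, List.getElem_range, Function.comp_apply, List.getElem_reverse]
    rw [PySem.List.pyGetD_eq_getElem]
    · congr 1
      simp at h1; omega
    · simp at h1 ⊢; omega
    · simp at h1 ⊢; omega

-- two-pointer characterization
theorem twoPtr_iff (v : List Char) (lo hi : Int) :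
    twoPtr v lo hi = true ↔
      ∀ i : Int, lo ≤ i → i ≤ hi →
        PySem.List.pyGetD v i ' ' = PySem.List.pyGetD v (lo + hi - i) ' ' := by
  fun_induction twoPtr v lo hi with
  | case1 lo hi h hne =>
    constructor
    · intro hfalse; cases hfalse
    · intro hall
      exact absurd (by have := hall lo le_rfl (le_of_lt h); simpa using this) hne
  | case2 lo hi h hne ih =>
    rw [ih]
    rw [not_ne_iff] at hne
    constructor
    · intro hall i h1 h2
      rcases eq_or_lt_of_le h1 with rfl | h1'
      · have he : lo + hi - lo = hi := by ring
        rw [he]; exact hne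
      · rcases eq_or_lt_of_le h2 with rfl | h2'
        · have he : lo + i - i = lo := by ring
          rw [he]; exact hne.symm
        · have := hall i (by omega) (by omega)
          have he : lo + 1 + (hi - 1) - i = lo + hi - i := by ring
          rw [he] at this; exact this
    · intro hall i h1 h2
      have := hall i (by omega) (by omega)
      have he : lo + 1 + (hi - 1) - i = lo + hi - i := by ring
      rw [he]; exact this
  | case3 lo hi h =>
    simp only [true_iff]
    intro i h1 h2
    have : i = lo + hi - i := by omega
    rw [← this]

theorem list_eq_reverse_iff (l : List Char) :
    (l = l.reverse) ↔ ∀ i : Int, 0 ≤ i → i ≤ (l.length : Int) - 1 →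
        PySem.List.pyGetD l i ' ' = PySem.List.pyGetD l ((l.length : Int) - 1 - i) ' ' := by
  constructor
  · intro hrev i h1 h2
    rw [PySem.List.pyGetD_eq_getElem _ _ h1 (by omega),
        PySem.List.pyGetD_eq_getElem _ _ (by omega) (by omega)]
    have h3 : l[i.toNat]'(by omega) = l.reverse[i.toNat]'(by simp; omega) :=
      List.getElem_of_eq hrev _
    rw [h3, List.getElem_reverse]
    congr 1
    omega
  · intro hall
    apply List.ext_getElem
    · simp
    · intro i h1 h2
      rw [List.getElem_reverse]
      have := hall (i : Int) (by omega) (by omega)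
      rw [PySem.List.pyGetD_eq_getElem _ _ (by omega) (by omega),
          PySem.List.pyGetD_eq_getElem _ _ (by omega) (by omega)] at this
      convert this using 2 <;> omega

-- ===== VERDICT (by name: the statement is the Claim_ definition above) =====
theorem verificarPalindromo_spec : Claim_equal_verificarPalindromo := by
  intro risada _
  unfold Spec_verificarPalindromo verificarPalindromo verificarPalindromo_alt
  simp only [PySem.List.foldl_append_ite_eq_filter, List.nil_append, reverter_eq_reverse]
  have hfilter : risada.toList.filter
      (fun letra => decide (PySem.Chars.lowerChar letra = 'a' ∨ PySem.Chars.lowerChar letra = 'e' ∨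
        PySem.Chars.lowerChar letra = 'i' ∨ PySem.Chars.lowerChar letra = 'o' ∨
        PySem.Chars.lowerChar letra = 'u')) =
      risada.toList.filter (fun letra => PySem.Chars.lowerChar letra ∈ ['a','e','i','o','u']) := by
    apply List.filter_congr
    intro c _
    simp [List.mem_cons]
  rw [hfilter]
  set l := risada.toList.filter (fun letra => PySem.Chars.lowerChar letra ∈ ['a','e','i','o','u']) with hl
  by_cases hpal : l = l.reverse
  · rw [if_pos hpal]
    have := (twoPtr_iff l 0 ((l.length : Int) - 1)).mpr
      (by intro i h1 h2; simpa using (list_eq_reverse_iff l).mp hpal i h1 h2)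
    exact this.symm
  · rw [if_neg hpal]
    rcases Bool.eq_false_or_eq_true (twoPtr l 0 ((l.length : Int) - 1)) with h | h
    · exfalso
      apply hpal
      rw [list_eq_reverse_iff]
      intro i h1 h2
      have := (twoPtr_iff l 0 ((l.length : Int) - 1)).mp h i h1 h2
      simpa using this
    · exact h.symm
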